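-- pv_equiv track=rewrite | github.com/fabricenativel/cpge-info | itc/files/C16/conway.py | suivant_rec
-- ===== SOURCE A (Python) =====
-- def suivant_rec(terme):
--     if len(terme)==0:
--         return ""
--     if len(terme)==1:
--         return "1"+terme
--     if len(terme)==2:
--         if (terme[0]==terme[1]):
--             return "2"+terme[0]
--         else:
--             return "1"+terme[0]+"1"+terme[1]
--     else:
--         if (terme[0]==terme[1]==terme[2]):
--             return "3"+terme[0]+suivant_rec(terme[3:])
--         if (terme[0]==terme[1]):
--             return "2"+terme[0]+suivant_rec(terme[2:])
--         else:
--             return "1"+terme[0]+suivant_rec(terme[1:])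
-- ===== SOURCE B (Python) =====
-- def suivant_rec(terme):
--     pieces = []
--     rest = terme
--     while rest:
--         ch = rest[0]
--         k = 1
--         while k < len(rest) and rest[k] == ch:
--             k += 1
--         q, r = divmod(k, 3)
--         pieces.extend(['3' + ch] * q)
--         if r:
--             pieces.append(str(r) + ch)
--         rest = rest[k:]
--     return ''.join(pieces)
-- ===== Notes on version B (the rewrite author's own statement) =====
-- stated objective: faster
-- what changed: Replaces A's greedy Python recursion that consumes 3/2/1 equal chars per call (with separate length-0/1/2 base cases) by an iterative single scan that measures each maximal run's full length k and derives the output chunks arithmetically via divmod(k, 3).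
import Mathlib
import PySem

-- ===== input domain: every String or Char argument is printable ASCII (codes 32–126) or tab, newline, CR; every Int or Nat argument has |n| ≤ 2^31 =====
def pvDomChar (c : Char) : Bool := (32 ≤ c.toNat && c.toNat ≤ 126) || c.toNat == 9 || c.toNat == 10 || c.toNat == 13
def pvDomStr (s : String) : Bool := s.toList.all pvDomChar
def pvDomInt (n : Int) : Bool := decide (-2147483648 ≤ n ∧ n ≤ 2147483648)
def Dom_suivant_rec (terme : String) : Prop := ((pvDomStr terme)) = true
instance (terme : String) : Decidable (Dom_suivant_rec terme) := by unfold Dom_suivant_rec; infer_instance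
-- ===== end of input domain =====

-- Faster iterative B: replaces A's greedy 3/2/1-at-a-time recursion by a single scan computing each
-- maximal run's full length and deriving the chunks with divmod(L, 3); a timing run measured B faster (A's Python recursion/slicing times out on large inputs).

-- ===== PORT A =====
-- A's char-by-char recursion: length-0/1/2 base cases, then consume 3, 2 or 1 equal chars.
def suivantA : List Char → List Char
  | [] => []
  | [a] => '1' :: [a]
  | [a, b] => if a == b then '2' :: [a] else '1' :: a :: '1' :: [b]
  | a :: b :: c :: rest =>
    if a == b && b == c then '3' :: a :: suivantA rest
    else if a == b then '2' :: a :: suivantA (c :: rest)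
    else '1' :: a :: suivantA (b :: c :: rest)

def suivant_rec (terme : String) : String := String.ofList (suivantA terme.toList)

-- ===== PORT B =====
-- pieces contributed by one maximal run of length k: q = k // 3 copies of '3'+ch, then str(r)+ch if r ≠ 0
def encodeRun (ch : Char) (k : Nat) : List Char :=
  (List.replicate (k / 3) ('3' :: [ch])).flatten ++
    (if k % 3 ≠ 0 then (PySem.Int.toStr ((k % 3 : Nat) : Int)).toList ++ [ch] else [])

-- Source B's outer while loop: measure the run at the head (inner while = takeWhile count), emit, drop it
def suivantB : List Char → List Char
  | [] => []
  | ch :: tl =>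
    let k := 1 + (tl.takeWhile (fun c => c == ch)).length
    encodeRun ch k ++ suivantB (tl.dropWhile (fun c => c == ch))
termination_by l => l.length
decreasing_by
  simpa using Nat.lt_succ_of_le (List.length_dropWhile_le _ _)

def suivant_rec_alt (terme : String) : String := String.ofList (suivantB terme.toList)

-- ===== PRECONDITION & SPEC =====
def Spec_suivant_rec (terme : String) (out : String) : Prop := out = suivant_rec_alt terme
instance (terme : String) (out : String) : Decidable (Spec_suivant_rec terme out) := by unfold Spec_suivant_rec; infer_instance

-- ===== CLAIM (what is proved, stated in full; the proofs are below) =====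
def Claim_equal_suivant_rec : Prop := ∀ (terme : String), Dom_suivant_rec terme → Spec_suivant_rec terme (suivant_rec terme)

-- ===== LEMMAS AND PROOFS =====

lemma toChars_one : PySem.Int.toChars 1 = ['1'] := by decide
lemma toChars_two : PySem.Int.toChars 2 = ['2'] := by decide

lemma suivantB_nil : suivantB [] = [] := by rw [suivantB]

lemma suivantB_cons (ch : Char) (tl : List Char) :
    suivantB (ch :: tl) =
      encodeRun ch (1 + (tl.takeWhile (fun c => c == ch)).length) ++
        suivantB (tl.dropWhile (fun c => c == ch)) := by
  rw [suivantB]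

lemma encodeRun_one (ch : Char) : encodeRun ch 1 = ['1', ch] := by
  unfold encodeRun
  norm_num
  rw [toChars_one]
  simp

lemma encodeRun_two (ch : Char) : encodeRun ch 2 = ['2', ch] := by
  unfold encodeRun
  norm_num
  rw [toChars_two]
  simp

-- splitting off one chunk of 3 from a run
lemma encodeRun_add_three (ch : Char) (j : Nat) :
    encodeRun ch (3 + j) = '3' :: ch :: encodeRun ch j := by
  unfold encodeRun
  have h1 : (3 + j) / 3 = 1 + j / 3 := by omega
  have h2 : (3 + j) % 3 = j % 3 := by omega
  simp [h1, h2, List.replicate_add]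

-- suivantB absorbs the leading run of a given char
lemma suivantB_run (a : Char) (l : List Char) :
    encodeRun a ((l.takeWhile (fun c => c == a)).length) ++
      suivantB (l.dropWhile (fun c => c == a)) = suivantB l := by
  cases l with
  | nil => simp [encodeRun, suivantB_nil]
  | cons x tl =>
    by_cases hx : x = a
    · subst hx
      rw [suivantB_cons]
      simp [Nat.add_comm]
    · simp [hx, encodeRun]

lemma suivantA_eq_suivantB (l : List Char) : suivantA l = suivantB l := by
  induction l using suivantA.induct with
  | case1 => simp [suivantA, suivantB_nil]
  | case2 a =>
    rw [suivantA, suivantB_cons]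
    simp [suivantB_nil, encodeRun_one]
  | case3 a b hab =>
    have hba : b = a := (eq_of_beq hab).symm
    rw [suivantA, if_pos hab, hba, suivantB_cons]
    simp [suivantB_nil, encodeRun_two]
  | case4 a b hab =>
    have hba : ¬ (b == a) = true := by rw [BEq.comm]; exact hab
    rw [suivantA, if_neg hab, suivantB_cons]
    simp [hba, suivantB_cons, suivantB_nil, encodeRun_one]
  | case5 a b c rest h ih =>
    have hba : b = a := (eq_of_beq ((Bool.and_eq_true _ _).mp h).1).symm
    have hca : c = a := by
      have hbc : c = b := (eq_of_beq ((Bool.and_eq_true _ _).mp h).2).symm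
      rw [hbc, hba]
    rw [suivantA, if_pos h, hba, hca, suivantB_cons]
    simp only [List.takeWhile_cons, List.dropWhile_cons, beq_self_eq_true, if_true,
      List.length_cons]
    have hk : 1 + ((rest.takeWhile (fun c => c == a)).length + 1 + 1)
        = 3 + (rest.takeWhile (fun c => c == a)).length := by omega
    rw [hk, encodeRun_add_three, ih]
    simp only [List.cons_append]
    congr 2
    exact (suivantB_run a rest).symm
  | case6 a b c rest h1 h2 ih =>
    have hba : b = a := (eq_of_beq h2).symm
    have hca : ¬ (c == a) = true := by
      intro hc
      apply h1
      have hc' : c = a := eq_of_beq hc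
      rw [hba, hc']
      simp
    rw [suivantA, if_neg h1, if_pos h2, hba, suivantB_cons]
    simp only [List.takeWhile_cons, List.dropWhile_cons, beq_self_eq_true, if_true, hca,
      List.length_cons]
    rw [ih]
    simp [encodeRun_two]
  | case7 a b c rest h1 h2 ih =>
    have hba : ¬ (b == a) = true := by rw [BEq.comm]; exact h2
    rw [suivantA, if_neg h1, if_neg h2, suivantB_cons]
    simp only [List.takeWhile_cons, List.dropWhile_cons, hba]
    rw [ih]
    simp [encodeRun_one]

-- ===== VERDICT (by name: the statement is the Claim_ definition above) =====
theorem suivant_rec_spec : Claim_equal_suivant_rec := by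
  intro terme _
  unfold Spec_suivant_rec suivant_rec suivant_rec_alt
  rw [suivantA_eq_suivantB]
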